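-- pv_equiv track=rewrite | github.com/jstrength/aoc | 2024/day9/part2/main.py | find_next_file_number_space
-- ===== SOURCE A (Python) =====
-- def find_next_file_number_space(start, memory):
--     p1 = -1
--     for i in range(start, -1, -1):
--         if memory[i] != '.':
--             if p1 == -1:
--                 p1 = i
--         if p1 != -1 and memory[p1] != memory[i]:
--             return (i+1, p1)
--     return None
-- ===== SOURCE B (Python) =====
-- def find_next_file_number_space(start, memory):
--     # Forward single pass: track the current run (char, begin) and the begin of the
--     # previous run, then read the answer off the final state.
--     cur_c = None
--     cur_b = -1
--     prev_b = -1
--     for j in range(start + 1):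
--         c = memory[j]
--         if c != cur_c:
--             prev_b = cur_b
--             cur_c = c
--             cur_b = j
--     if cur_c is None:
--         return None
--     if cur_c != '.':
--         b, e = cur_b, start
--     else:
--         if prev_b < 0:
--             return None
--         b, e = prev_b, cur_b - 1
--     if b == 0:
--         return None
--     return (b, e)
-- ===== Notes on version B (the rewrite author's own statement) =====
-- stated objective: alternative
-- what changed: Replaces A's backward scan from `start` (sentinel p1, combined return test) by a single FORWARD pass over memory[0..start] that maintains the begin index of the current run and of the previous run, reading the answer off the final state with run arithmetic.
-- outside the precondition, e.g. on find_next_file_number_space(5, ['a', 'b', 'c']): A raises IndexError, B raises IndexError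
import Mathlib
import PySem

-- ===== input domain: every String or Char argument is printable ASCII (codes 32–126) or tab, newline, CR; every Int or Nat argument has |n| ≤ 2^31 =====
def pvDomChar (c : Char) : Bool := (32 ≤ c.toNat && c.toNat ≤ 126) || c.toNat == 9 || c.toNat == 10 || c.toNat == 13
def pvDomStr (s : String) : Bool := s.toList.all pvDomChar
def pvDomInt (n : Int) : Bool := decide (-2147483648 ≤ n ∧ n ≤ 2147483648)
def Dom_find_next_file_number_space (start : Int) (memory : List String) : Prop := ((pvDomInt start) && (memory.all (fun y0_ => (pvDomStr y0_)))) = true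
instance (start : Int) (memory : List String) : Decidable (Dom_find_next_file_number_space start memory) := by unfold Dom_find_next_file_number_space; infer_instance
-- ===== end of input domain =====

-- B replaces A's backward scan from `start` by a single forward pass over memory[0..start]
-- tracking the begin indices of the current and previous runs (objective: alternative).

-- memory[i] ported as (pyGet? …).getD ""; inside Pre_ every accessed index is in range, so the
-- default is never consulted (out-of-range access raises IndexError in Python, excluded by Pre_).
def pvGetS (memory : List String) (i : Int) : String := (PySem.List.pyGet? memory i).getD ""

-- ===== PORT A =====
def findLoopA (memory : List String) : List Int → Int → Option (Int × Int)
  | [], _ => none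
  | i :: rest, p1 =>
    -- if memory[i] != '.': if p1 == -1: p1 = i
    if pvGetS memory i ≠ "." ∧ p1 = -1 then
      if (i : Int) ≠ -1 ∧ pvGetS memory i ≠ pvGetS memory i then some (i + 1, i)
      else findLoopA memory rest i
    else
      -- if p1 != -1 and memory[p1] != memory[i]: return (i+1, p1)
      if p1 ≠ -1 ∧ pvGetS memory p1 ≠ pvGetS memory i then some (i + 1, p1)
      else findLoopA memory rest p1

def find_next_file_number_space (start : Int) (memory : List String) : Option (Int × Int) :=
  findLoopA memory (PySem.List.pyRange start (-1) (-1)) (-1)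

-- ===== PORT B =====
-- state = (cur_c, cur_b, prev_b); loop body: if c != cur_c: prev_b, cur_c, cur_b = cur_b, c, j
def altStep (memory : List String) (st : Option String × Int × Int) (j : Int) : Option String × Int × Int :=
  let c := pvGetS memory j
  if st.1 = some c then st else (some c, j, st.2.1)

def altState (memory : List String) (start : Int) : Option String × Int × Int :=
  (PySem.List.pyRange 0 (start + 1) 1).foldl (altStep memory) (none, -1, -1)

-- the returns after the loop: None / choose (b, e) / the final `if b == 0` check (inlined per branch)
def altFinish (start : Int) (st : Option String × Int × Int) : Option (Int × Int) :=
  match st.1 with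
  | none => none
  | some t =>
    if t ≠ "." then (if st.2.1 = 0 then none else some (st.2.1, start))
    else if st.2.2 < 0 then none
    else if st.2.2 = 0 then none
    else some (st.2.2, st.2.1 - 1)

def find_next_file_number_space_alt (start : Int) (memory : List String) : Option (Int × Int) :=
  altFinish start (altState memory start)

-- ===== PRECONDITION & SPEC =====
-- Pre_ excludes exactly the inputs with 0 ≤ start and start ≥ len(memory), where Python A raises IndexError at memory[start].
def Pre_find_next_file_number_space (start : Int) (memory : List String) : Prop :=
  start < (memory.length : Int)
instance (start : Int) (memory : List String) : Decidable (Pre_find_next_file_number_space start memory) := by unfold Pre_find_next_file_number_space; infer_instance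

def pvWitness_find_next_file_number_space : Int × List String := (3, ["a", ".", "b", "b"])

def Spec_find_next_file_number_space (start : Int) (memory : List String) (out : Option (Int × Int)) : Prop := out = find_next_file_number_space_alt start memory
instance (start : Int) (memory : List String) (out : Option (Int × Int)) : Decidable (Spec_find_next_file_number_space start memory out) := by unfold Spec_find_next_file_number_space; infer_instance

-- ===== CLAIM (what is proved, stated in full; the proofs are below) =====
def Claim_equal_find_next_file_number_space : Prop := ∀ (start : Int) (memory : List String), Dom_find_next_file_number_space start memory → Pre_find_next_file_number_space start memory → Spec_find_next_file_number_space start memory (find_next_file_number_space start memory)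

-- ===== LEMMAS AND PROOFS =====

-- proof-side helper: A's leftover backward scan ("while i >= 0 and memory[i] == t: i -= 1")
def ph2 (memory : List String) (t : String) (i : Int) : Int :=
  if 0 ≤ i ∧ pvGetS memory i = t then ph2 memory t (i - 1) else i
termination_by (i + 1).toNat
decreasing_by omega

theorem ph2_step (memory : List String) (t : String) (i : Int) (h : 0 ≤ i)
    (he : pvGetS memory i = t) : ph2 memory t i = ph2 memory t (i - 1) := by
  conv_lhs => rw [ph2]
  rw [if_pos ⟨h, he⟩]

theorem ph2_stop (memory : List String) (t : String) (i : Int)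
    (h : ¬ (0 ≤ i ∧ pvGetS memory i = t)) : ph2 memory t i = i := by
  conv_lhs => rw [ph2]
  rw [if_neg h]

theorem ph2_bounds (memory : List String) (t : String) (i : Int) (h : -1 ≤ i) :
    -1 ≤ ph2 memory t i ∧ ph2 memory t i ≤ i := by
  by_cases hc : 0 ≤ i ∧ pvGetS memory i = t
  · rw [ph2_step memory t i hc.1 hc.2]
    have := ph2_bounds memory t (i - 1) (by omega)
    omega
  · rw [ph2_stop memory t i hc]
    omega
termination_by (i + 1).toNat
decreasing_by omega

-- Once p1 is pinned (0 ≤ p1), A's remaining loop is exactly the backward scan ph2 plus the finish.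
theorem findLoopA_fixed (memory : List String) (p1 : Int) (hp : 0 ≤ p1) (i : Int) :
    findLoopA memory (PySem.List.pyRange i (-1) (-1)) p1 =
      (if ph2 memory (pvGetS memory p1) i < 0 then none
       else some (ph2 memory (pvGetS memory p1) i + 1, p1)) := by
  by_cases h : i ≤ -1
  · rw [PySem.List.pyRange_neg_one_eq_nil h]
    rw [ph2_stop memory _ i (by intro hc; omega)]
    rw [if_pos (by omega : i < 0)]
    rfl
  · rw [PySem.List.pyRange_neg_one_cons (by omega : (-1 : Int) < i)]
    rw [findLoopA]
    rw [if_neg (by intro hc; omega : ¬ (pvGetS memory i ≠ "." ∧ p1 = -1))]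
    by_cases he : pvGetS memory i = pvGetS memory p1
    · rw [if_neg (by intro hc; exact hc.2 he.symm)]
      rw [ph2_step memory _ i (by omega) he]
      exact findLoopA_fixed memory p1 hp (i - 1)
    · rw [if_pos ⟨by omega, fun hc => he hc.symm⟩]
      rw [ph2_stop memory _ i (by intro hc; exact he hc.2)]
      rw [if_neg (by omega : ¬ i < 0)]
termination_by (i + 1).toNat
decreasing_by omega

theorem altState_neg (memory : List String) (start : Int) (h : start ≤ -1) :
    altState memory start = (none, -1, -1) := by
  unfold altState
  rw [PySem.List.pyRange_one_eq_nil (by omega : start + 1 ≤ 0)]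
  rfl

theorem altState_succ (memory : List String) (start : Int) (h : 0 ≤ start) :
    altState memory start = altStep memory (altState memory (start - 1)) start := by
  unfold altState
  rw [show start - 1 + 1 = start by omega]
  rw [PySem.List.pyRange_one_succ_right (by omega : (0 : Int) ≤ start)]
  rw [List.foldl_append]
  rfl

-- the forward pass computes exactly the run boundaries the backward scan ph2 finds
theorem altState_inv (memory : List String) (start : Int) (h : 0 ≤ start) :
    altState memory start =
      (some (pvGetS memory start),
       ph2 memory (pvGetS memory start) start + 1,
       if ph2 memory (pvGetS memory start) start + 1 = 0 then -1
       else ph2 memory (pvGetS memory (ph2 memory (pvGetS memory start) start))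
              (ph2 memory (pvGetS memory start) start) + 1) := by
  rw [altState_succ memory start h]
  by_cases h0 : start = 0
  · subst h0
    rw [show (0 : Int) - 1 = -1 by norm_num, altState_neg memory (-1) (by omega)]
    unfold altStep
    have hph : ph2 memory (pvGetS memory 0) 0 = -1 := by
      rw [ph2_step memory _ 0 le_rfl rfl, ph2_stop memory _ (0 - 1) (by intro hc; omega)]
      norm_num
    rw [hph]
    simp
  · have h1 : 0 ≤ start - 1 := by omega
    rw [altState_inv memory (start - 1) h1]
    unfold altStep
    by_cases he : pvGetS memory (start - 1) = pvGetS memory start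
    · rw [if_pos (by simp only [Option.some.injEq]; exact he)]
      have hsame : ph2 memory (pvGetS memory start) start
          = ph2 memory (pvGetS memory (start - 1)) (start - 1) := by
        rw [ph2_step memory _ start h rfl, he]
      rw [hsame, he]
    · rw [if_neg (by intro hc; exact he (Option.some.inj hc))]
      have hph : ph2 memory (pvGetS memory start) start = start - 1 := by
        rw [ph2_step memory _ start h rfl]
        exact ph2_stop memory _ (start - 1) (by intro hc; exact he hc.2)
      rw [hph]
      rw [if_neg (by omega : ¬ start - 1 + 1 = 0)]
      have hs : start - 1 + 1 = start := by omega
      rw [hs]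
termination_by start.toNat
decreasing_by omega

theorem altFinish_none (s : Int) (b p : Int) : altFinish s (none, b, p) = none := rfl

theorem altFinish_some (s b p : Int) (t : String) :
    altFinish s (some t, b, p) =
      if t ≠ "." then (if b = 0 then none else some (b, s))
      else if p < 0 then none
      else if p = 0 then none
      else some (p, b - 1) := rfl

theorem main_eq (memory : List String) (start : Int) :
    find_next_file_number_space start memory = find_next_file_number_space_alt start memory := by
  by_cases h : start ≤ -1
  · unfold find_next_file_number_space find_next_file_number_space_alt
    rw [PySem.List.pyRange_neg_one_eq_nil h, altState_neg memory start h, altFinish_none]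
    rfl
  · have h0 : 0 ≤ start := by omega
    have hinv := altState_inv memory start h0
    by_cases hdot : pvGetS memory start = "."
    · -- leading dot: A steps to start - 1; B's final state is read off the invariant
      have hA : find_next_file_number_space start memory
          = find_next_file_number_space (start - 1) memory := by
        unfold find_next_file_number_space
        rw [PySem.List.pyRange_neg_one_cons (by omega : (-1 : Int) < start)]
        rw [findLoopA]
        rw [if_neg (by intro hc; exact hc.1 hdot)]
        rw [if_neg (by intro hc; exact hc.1 rfl)]
      rw [hA, main_eq memory (start - 1)]
      unfold find_next_file_number_space_alt
      by_cases hz : start = 0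
      · subst hz
        rw [show (0 : Int) - 1 = -1 by norm_num, altState_neg memory (-1) (by omega), altFinish_none]
        have hph : ph2 memory (pvGetS memory 0) 0 = -1 := by
          rw [ph2_step memory _ 0 le_rfl rfl, ph2_stop memory _ (0 - 1) (by intro hc; omega)]
          norm_num
        rw [hinv, hph, hdot, altFinish_some]
        norm_num
      · have h1 : 0 ≤ start - 1 := by omega
        have hinv1 := altState_inv memory (start - 1) h1
        by_cases he : pvGetS memory (start - 1) = pvGetS memory start
        · -- same dot run: the state is unchanged and the dot branch of the finish ignores start
          have hstates : altState memory start = altState memory (start - 1) := by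
            rw [altState_succ memory start h0]
            unfold altStep
            rw [if_pos (by rw [hinv1]; simp only [Option.some.injEq]; exact he)]
          rw [hstates, hinv1]
          have ht' : pvGetS memory (start - 1) = "." := he.trans hdot
          rw [ht', altFinish_some, altFinish_some]
          norm_num
        · -- the dot run just started: prev_b names the non-dot run ending at start - 1
          have hstep : altState memory start
              = (some (pvGetS memory start), start, (altState memory (start - 1)).2.1) := by
            rw [altState_succ memory start h0]
            unfold altStep
            rw [if_neg (by rw [hinv1]; intro hc; exact he (Option.some.inj hc))]
          have hne' : pvGetS memory (start - 1) ≠ "." := fun hc => he (by rw [hc, hdot])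
          have hb := ph2_bounds memory (pvGetS memory (start - 1)) (start - 1) (by omega)
          rw [hstep, hinv1, hdot, altFinish_some, altFinish_some]
          rw [if_pos hne', if_neg (by simp : ¬ ("." : String) ≠ ".")]
          rw [if_neg (by omega : ¬ ph2 memory (pvGetS memory (start - 1)) (start - 1) + 1 < 0)]
    · -- memory[start] ≠ '.': A pins p1 = start; compare with B's non-dot finish
      unfold find_next_file_number_space find_next_file_number_space_alt
      rw [PySem.List.pyRange_neg_one_cons (by omega : (-1 : Int) < start)]
      rw [findLoopA]
      rw [if_pos ⟨hdot, rfl⟩]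
      rw [if_neg (by intro hc; exact hc.2 rfl)]
      rw [ph2_step memory _ start h0 rfl] at hinv
      rw [findLoopA_fixed memory start h0 (start - 1)]
      have hb := ph2_bounds memory (pvGetS memory start) (start - 1) (by omega)
      rw [hinv, altFinish_some, if_pos hdot]
      by_cases hneg : ph2 memory (pvGetS memory start) (start - 1) < 0
      · rw [if_pos hneg, if_pos (by omega : ph2 memory (pvGetS memory start) (start - 1) + 1 = 0)]
      · rw [if_neg hneg, if_neg (by omega : ¬ ph2 memory (pvGetS memory start) (start - 1) + 1 = 0)]
termination_by (start + 1).toNat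
decreasing_by omega

-- ===== VERDICT (by name: the statement is the Claim_ definition above) =====
theorem find_next_file_number_space_spec : Claim_equal_find_next_file_number_space := by
  intro start memory _ _
  exact main_eq memory start
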